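-- pv_equiv track=rewrite | github.com/daniel-reich/turbo-robot | vnzjuqjCf4MFHGLJp_2.py | shift_letters
-- ===== SOURCE A (Python) =====
-- def shift_letters(txt, n): # right
--     ws = [i for i, x in enumerate(txt) if x == ' ']
--     lst = [x for x in txt if x != ' ']
--     lst = [(x, (i + n) % len(lst)) for i, x in enumerate(lst)]
--     lst = sorted(lst, key=lambda x: x[1])
--     lst = [x[0] for x in lst]
--     for x in ws:
--         lst.insert(x, ' ')
--     return ''.join(lst)
-- ===== SOURCE B (Python) =====
-- def shift_letters(txt, n):
--     letters = [c for c in txt if c != ' ']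
--     m = len(letters)
--     if m:
--         k = n % m
--         letters = letters[m - k:] + letters[:m - k]
--     it = iter(letters)
--     return ''.join(c if c == ' ' else next(it) for c in txt)
-- ===== Notes on version B (the rewrite author's own statement) =====
-- stated objective: faster
-- what changed: B replaces A's decorate-with-(i+n)%m / sort / strip / per-space list.insert pipeline by a direct slice rotation of the letters plus a single interleaving pass that puts spaces back in place.
import Mathlib
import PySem

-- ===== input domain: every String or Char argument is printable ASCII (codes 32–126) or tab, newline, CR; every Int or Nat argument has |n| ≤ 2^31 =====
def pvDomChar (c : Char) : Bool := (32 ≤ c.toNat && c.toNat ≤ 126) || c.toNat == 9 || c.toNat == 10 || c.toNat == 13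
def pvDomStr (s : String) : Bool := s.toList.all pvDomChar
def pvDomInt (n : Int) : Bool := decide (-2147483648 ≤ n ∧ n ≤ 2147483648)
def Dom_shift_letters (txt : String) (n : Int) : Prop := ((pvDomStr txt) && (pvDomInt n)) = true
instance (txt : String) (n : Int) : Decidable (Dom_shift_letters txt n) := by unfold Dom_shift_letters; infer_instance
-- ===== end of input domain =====

-- B rotates the non-space letters directly with two slices and reinserts the spaces in one
-- interleaving pass, replacing A's sort-by-shifted-index plus per-space list.insert (faster).

-- ===== PORT A =====
def shift_letters (txt : String) (n : Int) : String :=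
  let cs := txt.toList
  let ws := ((PySem.List.enumerate cs).filter (fun p => p.2 = ' ')).map (fun p => p.1)
  let lst0 := cs.filter (fun x => x ≠ ' ')
  let lst1 := (PySem.List.enumerate lst0).map
      (fun p => (p.2, PySem.Int.mod (p.1 + n) (lst0.length : Int)))
  let lst2 := PySem.List.sorted lst1 (fun x => x.2) false
  let lst3 := lst2.map (fun x => x.1)
  let lst4 := ws.foldl (fun acc x => PySem.List.insert acc x ' ') lst3
  String.ofList lst4

-- ===== PORT B =====
-- 'next(it)' on the letter iterator: consume the head of the remaining-letters list.
-- (the [] branch is where Python's iterator would be exhausted; unreachable for B's call.)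
def pvInterleave : List Char → List Char → List Char
  | [], _ => []
  | c :: cs, ls =>
    if c = ' ' then c :: pvInterleave cs ls
    else match ls with
      | [] => []
      | l :: ls' => l :: pvInterleave cs ls'

def shift_letters_alt (txt : String) (n : Int) : String :=
  let cs := txt.toList
  let letters := cs.filter (fun c => c ≠ ' ')
  let m : Int := (letters.length : Int)
  let rot :=
    if m ≠ 0 then
      let k := PySem.Int.mod n m
      PySem.List.slice letters (some (m - k)) none ++ PySem.List.slice letters none (some (m - k))
    else letters
  String.ofList (pvInterleave cs rot)

-- ===== PRECONDITION & SPEC =====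
def Spec_shift_letters (txt : String) (n : Int) (out : String) : Prop := out = shift_letters_alt txt n
instance (txt : String) (n : Int) (out : String) : Decidable (Spec_shift_letters txt n out) := by unfold Spec_shift_letters; infer_instance

-- ===== CLAIM (what is proved, stated in full; the proofs are below) =====
def Claim_equal_shift_letters : Prop := ∀ (txt : String) (n : Int), Dom_shift_letters txt n → Spec_shift_letters txt n (shift_letters txt n)

-- ===== LEMMAS AND PROOFS =====

-- Inserting ' ' at the (increasing) space positions of cs into a letter list r of the right
-- length is the same as interleaving r with the spaces of cs; generalized over a prefix.
theorem pv_insert_spaces (cs : List Char) :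
    ∀ (pre r : List Char), r.length = (cs.filter (fun c => c ≠ ' ')).length →
    (((PySem.List.enumerate cs ((pre.length : Nat) : Int)).filter (fun p => p.2 = ' ')).map
        (fun p => p.1)).foldl (fun acc x => PySem.List.insert acc x ' ') (pre ++ r)
      = pre ++ pvInterleave cs r := by
  induction cs with
  | nil =>
    intro pre r h
    simp at h
    simp [PySem.List.enumerate, pvInterleave, h]
  | cons c cs ih =>
    intro pre r h
    rw [PySem.List.enumerate_cons]
    by_cases hc : c = ' '
    · subst hc
      simp only [List.filter_cons, List.map_cons, List.foldl_cons, decide_true, if_true]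
      have hins : PySem.List.insert (pre ++ r) ((pre.length : Nat) : Int) ' '
          = (pre ++ [' ']) ++ r := by
        rw [PySem.List.insert_natCast (pre ++ r) pre.length ' ' (by simp)]
        simp
      rw [hins]
      have h' : r.length = ((cs.filter (fun c => c ≠ ' '))).length := by
        simpa using h
      have := ih (pre ++ [' ']) r h'
      simp only [List.length_append, List.length_cons, List.length_nil] at this
      have hcast : ((pre.length : Nat) : Int) + 1 = ((pre.length + 1 : Nat) : Int) := by
        push_cast; ring
      rw [hcast]
      rw [this]
      simp [pvInterleave]
    · match r, h with
      | a :: r', h =>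
        simp only [List.filter_cons] at *
        rw [if_neg (by simp [hc])]
        have h' : r'.length = ((cs.filter (fun c => c ≠ ' '))).length := by
          rw [if_pos (by simp [hc])] at h
          simpa using h
        have := ih (pre ++ [a]) r' h'
        simp only [List.length_append, List.length_cons, List.length_nil] at this
        have hcast : ((pre.length : Nat) : Int) + 1 = ((pre.length + 1 : Nat) : Int) := by
          push_cast; ring
        rw [hcast]
        have hacc : pre ++ a :: r' = (pre ++ [a]) ++ r' := by simp
        rw [hacc, this]
        simp [pvInterleave, hc]
      | [], h => simp [hc] at h

-- keys of A's decorated list: the j-th element of the rotation (drop (m-k) ++ take (m-k))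
-- of the decorated list carries key exactly j.
theorem pv_sorted_rotation (L : List Char) (n : Int) (hm : 0 < L.length) :
    PySem.List.sorted
        ((PySem.List.enumerate L).map
          (fun p => (p.2, PySem.Int.mod (p.1 + n) (L.length : Int))))
        (fun x => x.2) false
      = (((PySem.List.enumerate L).map
          (fun p => (p.2, PySem.Int.mod (p.1 + n) (L.length : Int)))).drop
            (L.length - (PySem.Int.mod n (L.length : Int)).toNat))
        ++ (((PySem.List.enumerate L).map
          (fun p => (p.2, PySem.Int.mod (p.1 + n) (L.length : Int)))).take
            (L.length - (PySem.Int.mod n (L.length : Int)).toNat)) := by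
  set m := L.length with hmdef
  set k := (PySem.Int.mod n (m : Int)).toNat with hkdef
  have hmpos : (0 : Int) < (m : Int) := by exact_mod_cast hm
  have hk0 : 0 ≤ PySem.Int.mod n (m : Int) := PySem.Int.mod_nonneg n hmpos
  have hklt : PySem.Int.mod n (m : Int) < (m : Int) := PySem.Int.mod_lt n hmpos
  have hkm : k < m := by
    have : ((k : Int)) < (m : Int) := by rw [hkdef, Int.toNat_of_nonneg hk0]; exact hklt
    exact_mod_cast this
  set pairs := (PySem.List.enumerate L).map
      (fun p => (p.2, PySem.Int.mod (p.1 + n) (m : Int))) with hpairs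
  have hlen : pairs.length = m := by
    simp [hpairs, PySem.List.length_enumerate, hmdef]
  set ys := pairs.drop (m - k) ++ pairs.take (m - k) with hys
  have hperm : ys.Perm pairs := by
    rw [hys]
    have hp := List.perm_append_comm (l₁ := pairs.drop (m - k)) (l₂ := pairs.take (m - k))
    rwa [List.take_append_drop] at hp
  -- key of pairs[i] is (i + k) % m
  have hkey : ∀ (i : Nat) (hi : i < pairs.length), (pairs[i]).2 = (((i + k) % m : Nat) : Int) := by
    intro i hi
    have hi' : i < m := by rwa [hlen] at hi
    have : pairs[i] = (L[i]'(by omega), PySem.Int.mod ((i : Int) + n) (m : Int)) := by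
      simp [hpairs, PySem.List.getElem_enumerate]
    rw [this]
    have hmod : PySem.Int.mod ((i : Int) + n) (m : Int) = (((i + k) % m : Nat) : Int) := by
      rw [PySem.Int.mod_eq_emod_of_pos hmpos]
      have hnk : n % (m : Int) = (k : Int) := by
        rw [← PySem.Int.mod_eq_emod_of_pos hmpos, hkdef, Int.toNat_of_nonneg hk0]
      calc ((i : Int) + n) % (m : Int)
          = ((i : Int) + ((m : Int) * (n / (m : Int)) + n % (m : Int))) % (m : Int) := by
            rw [Int.mul_ediv_add_emod]
        _ = (((i : Int) + (k : Int)) + (m : Int) * (n / (m : Int))) % (m : Int) := by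
            rw [hnk]; ring_nf
        _ = ((i : Int) + (k : Int)) % (m : Int) := by rw [Int.add_mul_emod_self_left]
        _ = (((i + k) % m : Nat) : Int) := by exact_mod_cast rfl
    simp [hmod]
  have hylen : ys.length = m := by simp [hys, hlen]
  -- key of ys[j] is j
  have hykey : ∀ (j : Nat) (hj : j < ys.length), (ys[j]).2 = (j : Int) := by
    intro j hj
    have hj' : j < m := by rwa [hylen] at hj
    by_cases hjk : j < k
    · have h1 : ys[j] = (pairs.drop (m - k))[j]'(by simp [hlen]; omega) :=
        List.getElem_append_left (by simp [hlen]; omega)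
      have h2 : (pairs.drop (m - k))[j]'(by simp [hlen]; omega)
          = pairs[m - k + j]'(by rw [hlen]; omega) := List.getElem_drop ..
      rw [h1, h2, hkey (m - k + j) (by rw [hlen]; omega)]
      have hmj : (m - k + j + k) % m = j := by
        have he : m - k + j + k = m + j := by omega
        rw [he, Nat.add_mod_left, Nat.mod_eq_of_lt hj']
      rw [hmj]
    · have hlen1 : (pairs.drop (m - k)).length = k := by simp [hlen]; omega
      have h1 : ys[j] = (pairs.take (m - k))[j - (pairs.drop (m - k)).length]'(by
          simp [hlen]; omega) := List.getElem_append_right (by rw [hlen1]; omega)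
      have h2 : (pairs.take (m - k))[j - (pairs.drop (m - k)).length]'(by simp [hlen]; omega)
          = pairs[j - (pairs.drop (m - k)).length]'(by rw [hlen, hlen1]; omega) :=
        List.getElem_take ..
      rw [h1, h2, hkey _ (by rw [hlen, hlen1]; omega), hlen1]
      have hmj : (j - k + k) % m = j := by
        have he : j - k + k = j := by omega
        rw [he, Nat.mod_eq_of_lt hj']
      rw [hmj]
  have hpw : ys.Pairwise (fun a b => (fun x : Char × Int => x.2) a < (fun x : Char × Int => x.2) b) := by
    rw [List.pairwise_iff_getElem]
    intro i j hi hj hij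
    show ys[i].2 < ys[j].2
    rw [hykey i hi, hykey j hj]
    exact_mod_cast hij
  exact PySem.List.sorted_eq_of_perm_of_pairwise_lt _ _ _ hperm hpw

-- A's decorate/sort/strip pipeline produces exactly B's slice rotation of the letters.
theorem pv_rot_eq (L : List Char) (n : Int) :
    (PySem.List.sorted ((PySem.List.enumerate L).map
        (fun p => (p.2, PySem.Int.mod (p.1 + n) (L.length : Int)))) (fun x => x.2)).map
      (fun x => x.1)
    = if (L.length : Int) ≠ 0 then
        PySem.List.slice L (some ((L.length : Int) - PySem.Int.mod n (L.length : Int))) none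
        ++ PySem.List.slice L none (some ((L.length : Int) - PySem.Int.mod n (L.length : Int)))
      else L := by
  by_cases hm : L.length = 0
  · have hL0 : L = [] := List.length_eq_zero_iff.mp hm
    subst hL0
    simp [PySem.List.enumerate, PySem.List.sorted]
  · have hmpos : 0 < L.length := Nat.pos_of_ne_zero hm
    have hmposI : (0 : Int) < (L.length : Int) := by exact_mod_cast hmpos
    have hk0 : 0 ≤ PySem.Int.mod n (L.length : Int) := PySem.Int.mod_nonneg n hmposI
    have hklt : PySem.Int.mod n (L.length : Int) < (L.length : Int) := PySem.Int.mod_lt n hmposI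
    set k := (PySem.Int.mod n (L.length : Int)).toNat with hkdef
    have hkI : PySem.Int.mod n (L.length : Int) = (k : Int) := by
      rw [hkdef, Int.toNat_of_nonneg hk0]
    rw [pv_sorted_rotation L n hmpos, if_pos (by exact_mod_cast hmposI.ne')]
    have hsub : ((L.length : Int) - PySem.Int.mod n (L.length : Int))
        = (((L.length - k : Nat)) : Int) := by
      have : (k : Int) < (L.length : Int) := by rw [← hkI]; exact hklt
      rw [hkI]; push_cast [Nat.cast_sub (by exact_mod_cast this.le)]; ring
    rw [hsub, PySem.List.slice_from_natCast, PySem.List.slice_to_natCast,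
      List.map_append, List.map_drop, List.map_take, List.map_map]
    have hfst : ((PySem.List.enumerate L).map
        ((fun x : Char × Int => x.1) ∘ fun p : Int × Char =>
          (p.2, PySem.Int.mod (p.1 + n) (L.length : Int)))) = L := by
      have h := PySem.List.map_snd_enumerate L 0
      calc ((PySem.List.enumerate L).map
            ((fun x : Char × Int => x.1) ∘ fun p : Int × Char =>
              (p.2, PySem.Int.mod (p.1 + n) (L.length : Int))))
          = (PySem.List.enumerate L).map (fun p => p.2) := List.map_congr_left (fun _ _ => rfl)
        _ = L := h
    rw [hfst]

-- ===== VERDICT (by name: the statement is the Claim_ definition above) =====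
theorem shift_letters_spec : Claim_equal_shift_letters := by
  intro txt n _
  unfold Spec_shift_letters shift_letters shift_letters_alt
  simp only []
  set cs := txt.toList with hcs
  set L := cs.filter (fun x => x ≠ ' ') with hL
  rw [pv_rot_eq L n]
  set r := (if (L.length : Int) ≠ 0 then
        PySem.List.slice L (some ((L.length : Int) - PySem.Int.mod n (L.length : Int))) none
        ++ PySem.List.slice L none (some ((L.length : Int) - PySem.Int.mod n (L.length : Int)))
      else L) with hr
  have hrlen : r.length = (cs.filter (fun c => c ≠ ' ')).length := by
    rw [hr, ← pv_rot_eq L n]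
    simp [PySem.List.length_sorted, PySem.List.length_enumerate, hL, decide_not]
  have hins := pv_insert_spaces cs [] r hrlen
  simp only [List.nil_append, List.length_nil, Nat.cast_zero] at hins
  rw [hins]
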